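-- pv_equiv track=rewrite | github.com/bryceweiner/h-lcdm | pipeline/ml/data_preparation.py | get_survey_mapping
-- ===== SOURCE A (Python) =====
-- from typing import Dict, Any, List, Optional
--
-- def get_survey_mapping(cosmological_data: Dict[str, Any]) -> Dict[str, List[str]]:
--     """
--     Get mapping of survey names to their modalities.
--
--     Parameters:
--         cosmological_data: Dictionary of loaded cosmological data
--
--     Returns:
--         Dictionary mapping survey names to lists of modality keys
--     """
--     return {
--         'ACT': [k for k in cosmological_data.keys() if k.startswith('cmb_act_dr6_')],
--         'Planck': [k for k in cosmological_data.keys() if k.startswith('cmb_planck_2018_')],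
--         'SPT-3G': [k for k in cosmological_data.keys() if k.startswith('cmb_spt3g_')],
--         'COBE': [k for k in cosmological_data.keys() if k.startswith('cmb_cobe_')],
--         'WMAP': [k for k in cosmological_data.keys() if k.startswith('cmb_wmap_')],
--         'BOSS': ['bao_boss_dr12'],
--         'DESI': ['bao_desi', 'void_desivast'],
--         'eBOSS': ['bao_eboss'],
--         'SDSS': ['void_sdss_dr7', 'void_sdss_dr16', 'galaxy'],
--         'FRB': ['frb'],
--         'Lyman-alpha': ['lyman_alpha'],
--         'JWST': ['jwst'],
--         'LIGO': [k for k in cosmological_data.keys() if k.startswith('gw_ligo')],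
--         'Virgo': [k for k in cosmological_data.keys() if k.startswith('gw_virgo')],
--         'KAGRA': [k for k in cosmological_data.keys() if k.startswith('gw_kagra')]
--     }
-- ===== SOURCE B (Python) =====
-- _PREFIX_TO_SURVEY = {
--     'cmb_act_dr6_': 'ACT',
--     'cmb_planck_2018_': 'Planck',
--     'cmb_spt3g_': 'SPT-3G',
--     'cmb_cobe_': 'COBE',
--     'cmb_wmap_': 'WMAP',
--     'gw_ligo': 'LIGO',
--     'gw_virgo': 'Virgo',
--     'gw_kagra': 'KAGRA',
-- }
-- _PREFIX_LENGTHS = sorted({len(p) for p in _PREFIX_TO_SURVEY})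
--
--
-- def get_survey_mapping(cosmological_data):
--     """Classify each key by hashing its length-L head slice into a prefix table
--     (one lookup per distinct prefix length) instead of running prefix tests;
--     no two table prefixes are prefixes of each other, so each key lands in at
--     most one bucket and we can stop at the first hit."""
--     buckets = {'ACT': [], 'Planck': [], 'SPT-3G': [], 'COBE': [], 'WMAP': [],
--                'LIGO': [], 'Virgo': [], 'KAGRA': []}
--     for k in cosmological_data.keys():
--         for L in _PREFIX_LENGTHS:
--             survey = _PREFIX_TO_SURVEY.get(k[:L])
--             if survey is not None:
--                 buckets[survey].append(k)
--                 break
--     return {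
--         'ACT': buckets['ACT'],
--         'Planck': buckets['Planck'],
--         'SPT-3G': buckets['SPT-3G'],
--         'COBE': buckets['COBE'],
--         'WMAP': buckets['WMAP'],
--         'BOSS': ['bao_boss_dr12'],
--         'DESI': ['bao_desi', 'void_desivast'],
--         'eBOSS': ['bao_eboss'],
--         'SDSS': ['void_sdss_dr7', 'void_sdss_dr16', 'galaxy'],
--         'FRB': ['frb'],
--         'Lyman-alpha': ['lyman_alpha'],
--         'JWST': ['jwst'],
--         'LIGO': buckets['LIGO'],
--         'Virgo': buckets['Virgo'],
--         'KAGRA': buckets['KAGRA'],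
--     }
-- ===== Notes on version B (the rewrite author's own statement) =====
-- stated objective: alternative
-- what changed: Replaces A's eight startswith-filtered scans with a prefix hash table: each key's head slice at each of the six distinct prefix lengths is looked up in a prefix-to-survey dict (stopping at the first hit, valid because no table prefix is a prefix of another) and the key is appended to the single bucket found.
import Mathlib
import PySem

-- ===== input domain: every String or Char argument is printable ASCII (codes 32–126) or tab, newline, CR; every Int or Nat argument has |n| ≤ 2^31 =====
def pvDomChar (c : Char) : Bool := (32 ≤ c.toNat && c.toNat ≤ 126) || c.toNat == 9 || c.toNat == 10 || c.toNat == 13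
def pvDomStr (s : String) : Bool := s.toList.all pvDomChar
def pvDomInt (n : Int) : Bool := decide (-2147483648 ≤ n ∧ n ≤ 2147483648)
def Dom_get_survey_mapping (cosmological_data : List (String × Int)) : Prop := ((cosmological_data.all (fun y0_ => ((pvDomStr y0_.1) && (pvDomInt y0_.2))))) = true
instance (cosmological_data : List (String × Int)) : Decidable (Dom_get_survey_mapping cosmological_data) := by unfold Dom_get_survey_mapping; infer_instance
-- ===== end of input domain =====

-- B classifies each key by looking up its head slice at each distinct prefix length in a
-- prefix-to-survey table (first hit wins), instead of A's eight startswith-filtered scans.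


-- ===== PORT A =====
-- dict.keys() of the association list: first occurrences in insertion order
def get_survey_mapping (cosmological_data : List (String × Int)) : List (String × List String) :=
  let keys := PySem.List.dedup (cosmological_data.map Prod.fst)
  [("ACT", keys.filter (fun k => PySem.Str.startswith k "cmb_act_dr6_")),
   ("Planck", keys.filter (fun k => PySem.Str.startswith k "cmb_planck_2018_")),
   ("SPT-3G", keys.filter (fun k => PySem.Str.startswith k "cmb_spt3g_")),
   ("COBE", keys.filter (fun k => PySem.Str.startswith k "cmb_cobe_")),
   ("WMAP", keys.filter (fun k => PySem.Str.startswith k "cmb_wmap_")),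
   ("BOSS", ["bao_boss_dr12"]),
   ("DESI", ["bao_desi", "void_desivast"]),
   ("eBOSS", ["bao_eboss"]),
   ("SDSS", ["void_sdss_dr7", "void_sdss_dr16", "galaxy"]),
   ("FRB", ["frb"]),
   ("Lyman-alpha", ["lyman_alpha"]),
   ("JWST", ["jwst"]),
   ("LIGO", keys.filter (fun k => PySem.Str.startswith k "gw_ligo")),
   ("Virgo", keys.filter (fun k => PySem.Str.startswith k "gw_virgo")),
   ("KAGRA", keys.filter (fun k => PySem.Str.startswith k "gw_kagra"))]

-- ===== PORT B =====
-- the module-level prefix table _PREFIX_TO_SURVEY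
def prefixTable : PySem.Dict String String :=
  PySem.Dict.ofList
    [("cmb_act_dr6_", "ACT"), ("cmb_planck_2018_", "Planck"), ("cmb_spt3g_", "SPT-3G"),
     ("cmb_cobe_", "COBE"), ("cmb_wmap_", "WMAP"), ("gw_ligo", "LIGO"),
     ("gw_virgo", "Virgo"), ("gw_kagra", "KAGRA")]

-- _PREFIX_LENGTHS = sorted({len(p) for p in _PREFIX_TO_SURVEY})
def prefixLengths : List Int :=
  PySem.List.sorted (PySem.Set.ofList (prefixTable.keys.map PySem.Str.len)) (fun x => x) false

-- B's inner 'for L in _PREFIX_LENGTHS: … break': first table hit on a head slice of k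
def classifyGo (k : String) : List Int → Option String
  | [] => none
  | L :: rest =>
    match prefixTable.get? (PySem.Str.slice k none (some L)) with
    | some survey => some survey
    | none => classifyGo k rest

-- one iteration of B's outer loop over the keys
def surveyStepB (buckets : PySem.Dict String (List String)) (k : String) :
    PySem.Dict String (List String) :=
  match classifyGo k prefixLengths with
  | some survey => buckets.modify survey [] (fun l => l ++ [k])
  | none => buckets

def get_survey_mapping_alt (cosmological_data : List (String × Int)) : List (String × List String) :=
  let keys := PySem.List.dedup (cosmological_data.map Prod.fst)
  let buckets0 : PySem.Dict String (List String) :=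
    PySem.Dict.ofList
      [("ACT", []), ("Planck", []), ("SPT-3G", []), ("COBE", []), ("WMAP", []),
       ("LIGO", []), ("Virgo", []), ("KAGRA", [])]
  let b := keys.foldl surveyStepB buckets0
  [("ACT", b.getD "ACT" []), ("Planck", b.getD "Planck" []), ("SPT-3G", b.getD "SPT-3G" []),
   ("COBE", b.getD "COBE" []), ("WMAP", b.getD "WMAP" []),
   ("BOSS", ["bao_boss_dr12"]),
   ("DESI", ["bao_desi", "void_desivast"]),
   ("eBOSS", ["bao_eboss"]),
   ("SDSS", ["void_sdss_dr7", "void_sdss_dr16", "galaxy"]),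
   ("FRB", ["frb"]),
   ("Lyman-alpha", ["lyman_alpha"]),
   ("JWST", ["jwst"]),
   ("LIGO", b.getD "LIGO" []), ("Virgo", b.getD "Virgo" []), ("KAGRA", b.getD "KAGRA" [])]

-- ===== PRECONDITION & SPEC =====
def Spec_get_survey_mapping (cosmological_data : List (String × Int)) (out : List (String × List String)) : Prop := out = get_survey_mapping_alt cosmological_data
instance (cosmological_data : List (String × Int)) (out : List (String × List String)) : Decidable (Spec_get_survey_mapping cosmological_data out) := by unfold Spec_get_survey_mapping; infer_instance

-- ===== CLAIM =====
def Claim_equal_get_survey_mapping : Prop := ∀ (cosmological_data : List (String × Int)), Dom_get_survey_mapping cosmological_data → Spec_get_survey_mapping cosmological_data (get_survey_mapping cosmological_data)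

-- ===== LEMMAS AND PROOFS =====
-- a head slice equal to some string makes that string a prefix (startswith true)
lemma sw_of_take_eq (k X : String) (L : Nat) (h : k.toList.take L = X.toList) :
    PySem.Str.startswith k X = true := by
  rw [PySem.Str.startswith_eq, PySem.Chars.startswith_iff, ← h]
  exact List.take_prefix L k.toList

-- startswith at a prefix of exactly length L fixes the length-L head slice
lemma take_eq_of_sw (k X : String) (L : Nat) (hL : X.toList.length = L)
    (h : PySem.Str.startswith k X = true) : k.toList.take L = X.toList := by
  rw [PySem.Str.startswith_eq, PySem.Chars.startswith_iff] at h
  obtain ⟨t, ht⟩ := h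
  rw [← ht, ← hL, List.take_left]

-- two strings neither of which is a prefix of the other are never both prefixes of k
lemma sw_excl (k p q : String) (h : PySem.Str.startswith k p = true)
    (hpq : ¬ p.toList <+: q.toList) (hqp : ¬ q.toList <+: p.toList) :
    PySem.Str.startswith k q = false := by
  rw [PySem.Str.startswith_eq, PySem.Chars.startswith_iff] at h
  rw [PySem.Str.startswith_eq]
  rw [Bool.eq_false_iff]
  intro hq
  rw [PySem.Chars.startswith_iff] at hq
  rcases List.prefix_or_prefix_of_prefix h hq with hc | hc
  · exact hpq hc
  · exact hqp hc

-- the head slice of k at length L, as a list of chars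
lemma toList_headSlice (k : String) (L : Int) (h0 : 0 ≤ L) :
    (PySem.Str.slice k none (some L)).toList = k.toList.take L.toNat := by
  rw [PySem.Str.toList_slice, PySem.Chars.slice_eq_listSlice]
  exact PySem.List.slice_to k.toList h0

lemma prefixLengths_eval : prefixLengths = [7, 8, 9, 10, 12, 16] := by decide

-- a table hit: when X (of length L) is a prefix of k, the head slice looks up X's survey
lemma get?_hit (k X s : String) (L : Int) (h0 : 0 ≤ L) (hlen : X.toList.length = L.toNat)
    (hget : prefixTable.get? X = some s) (hsw : PySem.Str.startswith k X = true) :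
    prefixTable.get? (PySem.Str.slice k none (some L)) = some s := by
  have hx : PySem.Str.slice k none (some L) = X := by
    apply String.toList_inj.mp
    rw [toList_headSlice k L h0]
    exact take_eq_of_sw k X L.toNat hlen hsw
  rw [hx, hget]

-- a table miss: when no table prefix of length ≤ L starts k, the head slice is absent
lemma get?_miss (k : String) (L : Int) (h0 : 0 ≤ L)
    (h1 : ∀ X, X ∈ prefixTable.keys → X.toList.length ≤ L.toNat →
      PySem.Str.startswith k X = false) :
    prefixTable.get? (PySem.Str.slice k none (some L)) = none := by
  rw [PySem.Dict.get?_eq_none_iff_not_mem_keys]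
  intro hmem
  have hts : (PySem.Str.slice k none (some L)).toList = k.toList.take L.toNat :=
    toList_headSlice k L h0
  have hle : (PySem.Str.slice k none (some L)).toList.length ≤ L.toNat := by
    rw [hts]; simp
  have hsw := sw_of_take_eq k _ L.toNat hts.symm
  rw [h1 _ hmem hle] at hsw
  exact Bool.false_ne_true hsw

lemma prefixTable_eval : prefixTable = PySem.Dict.mk
    [("cmb_act_dr6_", "ACT"), ("cmb_planck_2018_", "Planck"), ("cmb_spt3g_", "SPT-3G"),
     ("cmb_cobe_", "COBE"), ("cmb_wmap_", "WMAP"), ("gw_ligo", "LIGO"),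
     ("gw_virgo", "Virgo"), ("gw_kagra", "KAGRA")] := by decide

lemma miss7 (k : String) (h0 : PySem.Str.startswith k "gw_ligo" = false) :
    prefixTable.get? (PySem.Str.slice k none (some 7)) = none := by
  refine get?_miss k 7 (by decide) ?_
  intro X hX hle
  revert hle
  rw [prefixTable_eval] at hX
  simp only [PySem.Dict.keys, List.map_cons, List.map_nil, List.mem_cons, List.not_mem_nil,
    or_false] at hX
  rcases hX with rfl|rfl|rfl|rfl|rfl|rfl|rfl|rfl
  · intro hc; exact absurd hc (by decide)
  · intro hc; exact absurd hc (by decide)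
  · intro hc; exact absurd hc (by decide)
  · intro hc; exact absurd hc (by decide)
  · intro hc; exact absurd hc (by decide)
  · intro _; exact h0
  · intro hc; exact absurd hc (by decide)
  · intro hc; exact absurd hc (by decide)

lemma miss8 (k : String) (h0 : PySem.Str.startswith k "gw_ligo" = false) (h1 : PySem.Str.startswith k "gw_virgo" = false) (h2 : PySem.Str.startswith k "gw_kagra" = false) :
    prefixTable.get? (PySem.Str.slice k none (some 8)) = none := by
  refine get?_miss k 8 (by decide) ?_
  intro X hX hle
  revert hle
  rw [prefixTable_eval] at hX
  simp only [PySem.Dict.keys, List.map_cons, List.map_nil, List.mem_cons, List.not_mem_nil,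
    or_false] at hX
  rcases hX with rfl|rfl|rfl|rfl|rfl|rfl|rfl|rfl
  · intro hc; exact absurd hc (by decide)
  · intro hc; exact absurd hc (by decide)
  · intro hc; exact absurd hc (by decide)
  · intro hc; exact absurd hc (by decide)
  · intro hc; exact absurd hc (by decide)
  · intro _; exact h0
  · intro _; exact h1
  · intro _; exact h2

lemma miss9 (k : String) (h0 : PySem.Str.startswith k "gw_ligo" = false) (h1 : PySem.Str.startswith k "gw_virgo" = false) (h2 : PySem.Str.startswith k "gw_kagra" = false) (h3 : PySem.Str.startswith k "cmb_cobe_" = false) (h4 : PySem.Str.startswith k "cmb_wmap_" = false) :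
    prefixTable.get? (PySem.Str.slice k none (some 9)) = none := by
  refine get?_miss k 9 (by decide) ?_
  intro X hX hle
  revert hle
  rw [prefixTable_eval] at hX
  simp only [PySem.Dict.keys, List.map_cons, List.map_nil, List.mem_cons, List.not_mem_nil,
    or_false] at hX
  rcases hX with rfl|rfl|rfl|rfl|rfl|rfl|rfl|rfl
  · intro hc; exact absurd hc (by decide)
  · intro hc; exact absurd hc (by decide)
  · intro hc; exact absurd hc (by decide)
  · intro _; exact h3
  · intro _; exact h4
  · intro _; exact h0
  · intro _; exact h1
  · intro _; exact h2

lemma miss10 (k : String) (h0 : PySem.Str.startswith k "gw_ligo" = false) (h1 : PySem.Str.startswith k "gw_virgo" = false) (h2 : PySem.Str.startswith k "gw_kagra" = false) (h3 : PySem.Str.startswith k "cmb_cobe_" = false) (h4 : PySem.Str.startswith k "cmb_wmap_" = false) (h5 : PySem.Str.startswith k "cmb_spt3g_" = false) :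
    prefixTable.get? (PySem.Str.slice k none (some 10)) = none := by
  refine get?_miss k 10 (by decide) ?_
  intro X hX hle
  revert hle
  rw [prefixTable_eval] at hX
  simp only [PySem.Dict.keys, List.map_cons, List.map_nil, List.mem_cons, List.not_mem_nil,
    or_false] at hX
  rcases hX with rfl|rfl|rfl|rfl|rfl|rfl|rfl|rfl
  · intro hc; exact absurd hc (by decide)
  · intro hc; exact absurd hc (by decide)
  · intro _; exact h5
  · intro _; exact h3
  · intro _; exact h4
  · intro _; exact h0
  · intro _; exact h1
  · intro _; exact h2

lemma miss12 (k : String) (h0 : PySem.Str.startswith k "gw_ligo" = false) (h1 : PySem.Str.startswith k "gw_virgo" = false) (h2 : PySem.Str.startswith k "gw_kagra" = false) (h3 : PySem.Str.startswith k "cmb_cobe_" = false) (h4 : PySem.Str.startswith k "cmb_wmap_" = false) (h5 : PySem.Str.startswith k "cmb_spt3g_" = false) (h6 : PySem.Str.startswith k "cmb_act_dr6_" = false) :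
    prefixTable.get? (PySem.Str.slice k none (some 12)) = none := by
  refine get?_miss k 12 (by decide) ?_
  intro X hX hle
  revert hle
  rw [prefixTable_eval] at hX
  simp only [PySem.Dict.keys, List.map_cons, List.map_nil, List.mem_cons, List.not_mem_nil,
    or_false] at hX
  rcases hX with rfl|rfl|rfl|rfl|rfl|rfl|rfl|rfl
  · intro _; exact h6
  · intro hc; exact absurd hc (by decide)
  · intro _; exact h5
  · intro _; exact h3
  · intro _; exact h4
  · intro _; exact h0
  · intro _; exact h1
  · intro _; exact h2

lemma miss16 (k : String) (h0 : PySem.Str.startswith k "gw_ligo" = false) (h1 : PySem.Str.startswith k "gw_virgo" = false) (h2 : PySem.Str.startswith k "gw_kagra" = false) (h3 : PySem.Str.startswith k "cmb_cobe_" = false) (h4 : PySem.Str.startswith k "cmb_wmap_" = false) (h5 : PySem.Str.startswith k "cmb_spt3g_" = false) (h6 : PySem.Str.startswith k "cmb_act_dr6_" = false) (h7 : PySem.Str.startswith k "cmb_planck_2018_" = false) :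
    prefixTable.get? (PySem.Str.slice k none (some 16)) = none := by
  refine get?_miss k 16 (by decide) ?_
  intro X hX hle
  revert hle
  rw [prefixTable_eval] at hX
  simp only [PySem.Dict.keys, List.map_cons, List.map_nil, List.mem_cons, List.not_mem_nil,
    or_false] at hX
  rcases hX with rfl|rfl|rfl|rfl|rfl|rfl|rfl|rfl
  · intro _; exact h6
  · intro _; exact h7
  · intro _; exact h5
  · intro _; exact h3
  · intro _; exact h4
  · intro _; exact h0
  · intro _; exact h1
  · intro _; exact h2

set_option maxHeartbeats 1000000 in
lemma classify_spec (k : String) :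
    classifyGo k prefixLengths =
      (if PySem.Str.startswith k "gw_ligo" then some "LIGO"
       else if PySem.Str.startswith k "gw_virgo" then some "Virgo"
       else if PySem.Str.startswith k "gw_kagra" then some "KAGRA"
       else if PySem.Str.startswith k "cmb_cobe_" then some "COBE"
       else if PySem.Str.startswith k "cmb_wmap_" then some "WMAP"
       else if PySem.Str.startswith k "cmb_spt3g_" then some "SPT-3G"
       else if PySem.Str.startswith k "cmb_act_dr6_" then some "ACT"
       else if PySem.Str.startswith k "cmb_planck_2018_" then some "Planck"
       else none) := by
  rw [prefixLengths_eval]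
  simp only [classifyGo]
  rcases Bool.eq_false_or_eq_true (PySem.Str.startswith k "gw_ligo") with h0 | h0
  · rw [get?_hit k "gw_ligo" "LIGO" 7 (by decide) (by decide) (by decide) h0]
    rw [if_pos h0]
    try rfl
  · rcases Bool.eq_false_or_eq_true (PySem.Str.startswith k "gw_virgo") with h1 | h1
    · rw [miss7 k h0]
      rw [get?_hit k "gw_virgo" "Virgo" 8 (by decide) (by decide) (by decide) h1]
      rw [if_neg (by simpa using h0)]
      rw [if_pos h1]
      try rfl
    · rcases Bool.eq_false_or_eq_true (PySem.Str.startswith k "gw_kagra") with h2 | h2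
      · rw [miss7 k h0]
        rw [get?_hit k "gw_kagra" "KAGRA" 8 (by decide) (by decide) (by decide) h2]
        rw [if_neg (by simpa using h0)]
        rw [if_neg (by simpa using h1)]
        rw [if_pos h2]
        try rfl
      · rcases Bool.eq_false_or_eq_true (PySem.Str.startswith k "cmb_cobe_") with h3 | h3
        · rw [miss7 k h0]
          rw [miss8 k h0 h1 h2]
          rw [get?_hit k "cmb_cobe_" "COBE" 9 (by decide) (by decide) (by decide) h3]
          rw [if_neg (by simpa using h0)]
          rw [if_neg (by simpa using h1)]
          rw [if_neg (by simpa using h2)]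
          rw [if_pos h3]
          try rfl
        · rcases Bool.eq_false_or_eq_true (PySem.Str.startswith k "cmb_wmap_") with h4 | h4
          · rw [miss7 k h0]
            rw [miss8 k h0 h1 h2]
            rw [get?_hit k "cmb_wmap_" "WMAP" 9 (by decide) (by decide) (by decide) h4]
            rw [if_neg (by simpa using h0)]
            rw [if_neg (by simpa using h1)]
            rw [if_neg (by simpa using h2)]
            rw [if_neg (by simpa using h3)]
            rw [if_pos h4]
            try rfl
          · rcases Bool.eq_false_or_eq_true (PySem.Str.startswith k "cmb_spt3g_") with h5 | h5
            · rw [miss7 k h0]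
              rw [miss8 k h0 h1 h2]
              rw [miss9 k h0 h1 h2 h3 h4]
              rw [get?_hit k "cmb_spt3g_" "SPT-3G" 10 (by decide) (by decide) (by decide) h5]
              rw [if_neg (by simpa using h0)]
              rw [if_neg (by simpa using h1)]
              rw [if_neg (by simpa using h2)]
              rw [if_neg (by simpa using h3)]
              rw [if_neg (by simpa using h4)]
              rw [if_pos h5]
              try rfl
            · rcases Bool.eq_false_or_eq_true (PySem.Str.startswith k "cmb_act_dr6_") with h6 | h6
              · rw [miss7 k h0]
                rw [miss8 k h0 h1 h2]
                rw [miss9 k h0 h1 h2 h3 h4]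
                rw [miss10 k h0 h1 h2 h3 h4 h5]
                rw [get?_hit k "cmb_act_dr6_" "ACT" 12 (by decide) (by decide) (by decide) h6]
                rw [if_neg (by simpa using h0)]
                rw [if_neg (by simpa using h1)]
                rw [if_neg (by simpa using h2)]
                rw [if_neg (by simpa using h3)]
                rw [if_neg (by simpa using h4)]
                rw [if_neg (by simpa using h5)]
                rw [if_pos h6]
                try rfl
              · rcases Bool.eq_false_or_eq_true (PySem.Str.startswith k "cmb_planck_2018_") with h7 | h7
                · rw [miss7 k h0]
                  rw [miss8 k h0 h1 h2]
                  rw [miss9 k h0 h1 h2 h3 h4]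
                  rw [miss10 k h0 h1 h2 h3 h4 h5]
                  rw [miss12 k h0 h1 h2 h3 h4 h5 h6]
                  rw [get?_hit k "cmb_planck_2018_" "Planck" 16 (by decide) (by decide) (by decide) h7]
                  rw [if_neg (by simpa using h0)]
                  rw [if_neg (by simpa using h1)]
                  rw [if_neg (by simpa using h2)]
                  rw [if_neg (by simpa using h3)]
                  rw [if_neg (by simpa using h4)]
                  rw [if_neg (by simpa using h5)]
                  rw [if_neg (by simpa using h6)]
                  rw [if_pos h7]
                  try rfl
                · rw [miss7 k h0]
                  rw [miss8 k h0 h1 h2]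
                  rw [miss9 k h0 h1 h2 h3 h4]
                  rw [miss10 k h0 h1 h2 h3 h4 h5]
                  rw [miss12 k h0 h1 h2 h3 h4 h5 h6]
                  rw [miss16 k h0 h1 h2 h3 h4 h5 h6 h7]
                  rw [if_neg (by simpa using h0)]
                  rw [if_neg (by simpa using h1)]
                  rw [if_neg (by simpa using h2)]
                  rw [if_neg (by simpa using h3)]
                  rw [if_neg (by simpa using h4)]
                  rw [if_neg (by simpa using h5)]
                  rw [if_neg (by simpa using h6)]
                  rw [if_neg (by simpa using h7)]
                  try rfl

-- the outer loop's invariant: each bucket accumulates exactly the keys A's filter keeps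
set_option maxHeartbeats 1000000 in
lemma foldl_surveyStepB (ks : List String) (a p s c w l v g : List String) :
    ks.foldl surveyStepB (PySem.Dict.mk
      [("ACT", a), ("Planck", p), ("SPT-3G", s), ("COBE", c), ("WMAP", w),
       ("LIGO", l), ("Virgo", v), ("KAGRA", g)]) =
    PySem.Dict.mk
      [("ACT", a ++ ks.filter (fun k => PySem.Str.startswith k "cmb_act_dr6_")),
       ("Planck", p ++ ks.filter (fun k => PySem.Str.startswith k "cmb_planck_2018_")),
       ("SPT-3G", s ++ ks.filter (fun k => PySem.Str.startswith k "cmb_spt3g_")),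
       ("COBE", c ++ ks.filter (fun k => PySem.Str.startswith k "cmb_cobe_")),
       ("WMAP", w ++ ks.filter (fun k => PySem.Str.startswith k "cmb_wmap_")),
       ("LIGO", l ++ ks.filter (fun k => PySem.Str.startswith k "gw_ligo")),
       ("Virgo", v ++ ks.filter (fun k => PySem.Str.startswith k "gw_virgo")),
       ("KAGRA", g ++ ks.filter (fun k => PySem.Str.startswith k "gw_kagra"))] := by
  induction ks generalizing a p s c w l v g with
  | nil => simp
  | cons k ks ih =>
    simp only [List.foldl_cons]
    rcases Bool.eq_false_or_eq_true (PySem.Str.startswith k "gw_ligo") with h0 | h0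
    · have e1 : PySem.Str.startswith k "gw_virgo" = false := sw_excl k "gw_ligo" "gw_virgo" h0 (by decide) (by decide)
      have e2 : PySem.Str.startswith k "gw_kagra" = false := sw_excl k "gw_ligo" "gw_kagra" h0 (by decide) (by decide)
      have e3 : PySem.Str.startswith k "cmb_cobe_" = false := sw_excl k "gw_ligo" "cmb_cobe_" h0 (by decide) (by decide)
      have e4 : PySem.Str.startswith k "cmb_wmap_" = false := sw_excl k "gw_ligo" "cmb_wmap_" h0 (by decide) (by decide)
      have e5 : PySem.Str.startswith k "cmb_spt3g_" = false := sw_excl k "gw_ligo" "cmb_spt3g_" h0 (by decide) (by decide)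
      have e6 : PySem.Str.startswith k "cmb_act_dr6_" = false := sw_excl k "gw_ligo" "cmb_act_dr6_" h0 (by decide) (by decide)
      have e7 : PySem.Str.startswith k "cmb_planck_2018_" = false := sw_excl k "gw_ligo" "cmb_planck_2018_" h0 (by decide) (by decide)
      have hcl : classifyGo k prefixLengths = some "LIGO" := by
        rw [classify_spec]; rw [if_pos h0]
      rw [show surveyStepB (PySem.Dict.mk [("ACT", a), ("Planck", p), ("SPT-3G", s), ("COBE", c), ("WMAP", w), ("LIGO", l), ("Virgo", v), ("KAGRA", g)]) k = PySem.Dict.mk [("ACT", a), ("Planck", p), ("SPT-3G", s), ("COBE", c), ("WMAP", w), ("LIGO", l ++ [k]), ("Virgo", v), ("KAGRA", g)] from by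
        simp [surveyStepB, hcl, PySem.Dict.modify, PySem.Dict.getD, PySem.Dict.get?_mk_cons, PySem.Dict.insert, PySem.Dict.contains]]
      rw [ih]
      simp only [List.filter_cons]
      rw [e1, e2, e3, e4, e5, e6, e7, h0]
      simp
    · rcases Bool.eq_false_or_eq_true (PySem.Str.startswith k "gw_virgo") with h1 | h1
      · have e2 : PySem.Str.startswith k "gw_kagra" = false := sw_excl k "gw_virgo" "gw_kagra" h1 (by decide) (by decide)
        have e3 : PySem.Str.startswith k "cmb_cobe_" = false := sw_excl k "gw_virgo" "cmb_cobe_" h1 (by decide) (by decide)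
        have e4 : PySem.Str.startswith k "cmb_wmap_" = false := sw_excl k "gw_virgo" "cmb_wmap_" h1 (by decide) (by decide)
        have e5 : PySem.Str.startswith k "cmb_spt3g_" = false := sw_excl k "gw_virgo" "cmb_spt3g_" h1 (by decide) (by decide)
        have e6 : PySem.Str.startswith k "cmb_act_dr6_" = false := sw_excl k "gw_virgo" "cmb_act_dr6_" h1 (by decide) (by decide)
        have e7 : PySem.Str.startswith k "cmb_planck_2018_" = false := sw_excl k "gw_virgo" "cmb_planck_2018_" h1 (by decide) (by decide)
        have hcl : classifyGo k prefixLengths = some "Virgo" := by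
          rw [classify_spec]; rw [if_neg (by rw [h0]; simp)]; rw [if_pos h1]
        rw [show surveyStepB (PySem.Dict.mk [("ACT", a), ("Planck", p), ("SPT-3G", s), ("COBE", c), ("WMAP", w), ("LIGO", l), ("Virgo", v), ("KAGRA", g)]) k = PySem.Dict.mk [("ACT", a), ("Planck", p), ("SPT-3G", s), ("COBE", c), ("WMAP", w), ("LIGO", l), ("Virgo", v ++ [k]), ("KAGRA", g)] from by
          simp [surveyStepB, hcl, PySem.Dict.modify, PySem.Dict.getD, PySem.Dict.get?_mk_cons, PySem.Dict.insert, PySem.Dict.contains]]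
        rw [ih]
        simp only [List.filter_cons]
        rw [h0, e2, e3, e4, e5, e6, e7, h1]
        simp
      · rcases Bool.eq_false_or_eq_true (PySem.Str.startswith k "gw_kagra") with h2 | h2
        · have e3 : PySem.Str.startswith k "cmb_cobe_" = false := sw_excl k "gw_kagra" "cmb_cobe_" h2 (by decide) (by decide)
          have e4 : PySem.Str.startswith k "cmb_wmap_" = false := sw_excl k "gw_kagra" "cmb_wmap_" h2 (by decide) (by decide)
          have e5 : PySem.Str.startswith k "cmb_spt3g_" = false := sw_excl k "gw_kagra" "cmb_spt3g_" h2 (by decide) (by decide)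
          have e6 : PySem.Str.startswith k "cmb_act_dr6_" = false := sw_excl k "gw_kagra" "cmb_act_dr6_" h2 (by decide) (by decide)
          have e7 : PySem.Str.startswith k "cmb_planck_2018_" = false := sw_excl k "gw_kagra" "cmb_planck_2018_" h2 (by decide) (by decide)
          have hcl : classifyGo k prefixLengths = some "KAGRA" := by
            rw [classify_spec]; rw [if_neg (by rw [h0]; simp)]; rw [if_neg (by rw [h1]; simp)]; rw [if_pos h2]
          rw [show surveyStepB (PySem.Dict.mk [("ACT", a), ("Planck", p), ("SPT-3G", s), ("COBE", c), ("WMAP", w), ("LIGO", l), ("Virgo", v), ("KAGRA", g)]) k = PySem.Dict.mk [("ACT", a), ("Planck", p), ("SPT-3G", s), ("COBE", c), ("WMAP", w), ("LIGO", l), ("Virgo", v), ("KAGRA", g ++ [k])] from by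
            simp [surveyStepB, hcl, PySem.Dict.modify, PySem.Dict.getD, PySem.Dict.get?_mk_cons, PySem.Dict.insert, PySem.Dict.contains]]
          rw [ih]
          simp only [List.filter_cons]
          rw [h0, h1, e3, e4, e5, e6, e7, h2]
          simp
        · rcases Bool.eq_false_or_eq_true (PySem.Str.startswith k "cmb_cobe_") with h3 | h3
          · have e4 : PySem.Str.startswith k "cmb_wmap_" = false := sw_excl k "cmb_cobe_" "cmb_wmap_" h3 (by decide) (by decide)
            have e5 : PySem.Str.startswith k "cmb_spt3g_" = false := sw_excl k "cmb_cobe_" "cmb_spt3g_" h3 (by decide) (by decide)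
            have e6 : PySem.Str.startswith k "cmb_act_dr6_" = false := sw_excl k "cmb_cobe_" "cmb_act_dr6_" h3 (by decide) (by decide)
            have e7 : PySem.Str.startswith k "cmb_planck_2018_" = false := sw_excl k "cmb_cobe_" "cmb_planck_2018_" h3 (by decide) (by decide)
            have hcl : classifyGo k prefixLengths = some "COBE" := by
              rw [classify_spec]; rw [if_neg (by rw [h0]; simp)]; rw [if_neg (by rw [h1]; simp)]; rw [if_neg (by rw [h2]; simp)]; rw [if_pos h3]
            rw [show surveyStepB (PySem.Dict.mk [("ACT", a), ("Planck", p), ("SPT-3G", s), ("COBE", c), ("WMAP", w), ("LIGO", l), ("Virgo", v), ("KAGRA", g)]) k = PySem.Dict.mk [("ACT", a), ("Planck", p), ("SPT-3G", s), ("COBE", c ++ [k]), ("WMAP", w), ("LIGO", l), ("Virgo", v), ("KAGRA", g)] from by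
              simp [surveyStepB, hcl, PySem.Dict.modify, PySem.Dict.getD, PySem.Dict.get?_mk_cons, PySem.Dict.insert, PySem.Dict.contains]]
            rw [ih]
            simp only [List.filter_cons]
            rw [h0, h1, h2, e4, e5, e6, e7, h3]
            simp
          · rcases Bool.eq_false_or_eq_true (PySem.Str.startswith k "cmb_wmap_") with h4 | h4
            · have e5 : PySem.Str.startswith k "cmb_spt3g_" = false := sw_excl k "cmb_wmap_" "cmb_spt3g_" h4 (by decide) (by decide)
              have e6 : PySem.Str.startswith k "cmb_act_dr6_" = false := sw_excl k "cmb_wmap_" "cmb_act_dr6_" h4 (by decide) (by decide)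
              have e7 : PySem.Str.startswith k "cmb_planck_2018_" = false := sw_excl k "cmb_wmap_" "cmb_planck_2018_" h4 (by decide) (by decide)
              have hcl : classifyGo k prefixLengths = some "WMAP" := by
                rw [classify_spec]; rw [if_neg (by rw [h0]; simp)]; rw [if_neg (by rw [h1]; simp)]; rw [if_neg (by rw [h2]; simp)]; rw [if_neg (by rw [h3]; simp)]; rw [if_pos h4]
              rw [show surveyStepB (PySem.Dict.mk [("ACT", a), ("Planck", p), ("SPT-3G", s), ("COBE", c), ("WMAP", w), ("LIGO", l), ("Virgo", v), ("KAGRA", g)]) k = PySem.Dict.mk [("ACT", a), ("Planck", p), ("SPT-3G", s), ("COBE", c), ("WMAP", w ++ [k]), ("LIGO", l), ("Virgo", v), ("KAGRA", g)] from by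
                simp [surveyStepB, hcl, PySem.Dict.modify, PySem.Dict.getD, PySem.Dict.get?_mk_cons, PySem.Dict.insert, PySem.Dict.contains]]
              rw [ih]
              simp only [List.filter_cons]
              rw [h0, h1, h2, h3, e5, e6, e7, h4]
              simp
            · rcases Bool.eq_false_or_eq_true (PySem.Str.startswith k "cmb_spt3g_") with h5 | h5
              · have e6 : PySem.Str.startswith k "cmb_act_dr6_" = false := sw_excl k "cmb_spt3g_" "cmb_act_dr6_" h5 (by decide) (by decide)
                have e7 : PySem.Str.startswith k "cmb_planck_2018_" = false := sw_excl k "cmb_spt3g_" "cmb_planck_2018_" h5 (by decide) (by decide)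
                have hcl : classifyGo k prefixLengths = some "SPT-3G" := by
                  rw [classify_spec]; rw [if_neg (by rw [h0]; simp)]; rw [if_neg (by rw [h1]; simp)]; rw [if_neg (by rw [h2]; simp)]; rw [if_neg (by rw [h3]; simp)]; rw [if_neg (by rw [h4]; simp)]; rw [if_pos h5]
                rw [show surveyStepB (PySem.Dict.mk [("ACT", a), ("Planck", p), ("SPT-3G", s), ("COBE", c), ("WMAP", w), ("LIGO", l), ("Virgo", v), ("KAGRA", g)]) k = PySem.Dict.mk [("ACT", a), ("Planck", p), ("SPT-3G", s ++ [k]), ("COBE", c), ("WMAP", w), ("LIGO", l), ("Virgo", v), ("KAGRA", g)] from by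
                  simp [surveyStepB, hcl, PySem.Dict.modify, PySem.Dict.getD, PySem.Dict.get?_mk_cons, PySem.Dict.insert, PySem.Dict.contains]]
                rw [ih]
                simp only [List.filter_cons]
                rw [h0, h1, h2, h3, h4, e6, e7, h5]
                simp
              · rcases Bool.eq_false_or_eq_true (PySem.Str.startswith k "cmb_act_dr6_") with h6 | h6
                · have e7 : PySem.Str.startswith k "cmb_planck_2018_" = false := sw_excl k "cmb_act_dr6_" "cmb_planck_2018_" h6 (by decide) (by decide)
                  have hcl : classifyGo k prefixLengths = some "ACT" := by
                    rw [classify_spec]; rw [if_neg (by rw [h0]; simp)]; rw [if_neg (by rw [h1]; simp)]; rw [if_neg (by rw [h2]; simp)]; rw [if_neg (by rw [h3]; simp)]; rw [if_neg (by rw [h4]; simp)]; rw [if_neg (by rw [h5]; simp)]; rw [if_pos h6]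
                  rw [show surveyStepB (PySem.Dict.mk [("ACT", a), ("Planck", p), ("SPT-3G", s), ("COBE", c), ("WMAP", w), ("LIGO", l), ("Virgo", v), ("KAGRA", g)]) k = PySem.Dict.mk [("ACT", a ++ [k]), ("Planck", p), ("SPT-3G", s), ("COBE", c), ("WMAP", w), ("LIGO", l), ("Virgo", v), ("KAGRA", g)] from by
                    simp [surveyStepB, hcl, PySem.Dict.modify, PySem.Dict.getD, PySem.Dict.get?_mk_cons, PySem.Dict.insert, PySem.Dict.contains]]
                  rw [ih]
                  simp only [List.filter_cons]
                  rw [h0, h1, h2, h3, h4, h5, e7, h6]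
                  simp
                · rcases Bool.eq_false_or_eq_true (PySem.Str.startswith k "cmb_planck_2018_") with h7 | h7
                  · have hcl : classifyGo k prefixLengths = some "Planck" := by
                      rw [classify_spec]; rw [if_neg (by rw [h0]; simp)]; rw [if_neg (by rw [h1]; simp)]; rw [if_neg (by rw [h2]; simp)]; rw [if_neg (by rw [h3]; simp)]; rw [if_neg (by rw [h4]; simp)]; rw [if_neg (by rw [h5]; simp)]; rw [if_neg (by rw [h6]; simp)]; rw [if_pos h7]
                    rw [show surveyStepB (PySem.Dict.mk [("ACT", a), ("Planck", p), ("SPT-3G", s), ("COBE", c), ("WMAP", w), ("LIGO", l), ("Virgo", v), ("KAGRA", g)]) k = PySem.Dict.mk [("ACT", a), ("Planck", p ++ [k]), ("SPT-3G", s), ("COBE", c), ("WMAP", w), ("LIGO", l), ("Virgo", v), ("KAGRA", g)] from by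
                      simp [surveyStepB, hcl, PySem.Dict.modify, PySem.Dict.getD, PySem.Dict.get?_mk_cons, PySem.Dict.insert, PySem.Dict.contains]]
                    rw [ih]
                    simp only [List.filter_cons]
                    rw [h0, h1, h2, h3, h4, h5, h6, h7]
                    simp
                  · have hcl : classifyGo k prefixLengths = none := by
                      rw [classify_spec]; rw [if_neg (by rw [h0]; simp)]; rw [if_neg (by rw [h1]; simp)]; rw [if_neg (by rw [h2]; simp)]; rw [if_neg (by rw [h3]; simp)]; rw [if_neg (by rw [h4]; simp)]; rw [if_neg (by rw [h5]; simp)]; rw [if_neg (by rw [h6]; simp)]; rw [if_neg (by rw [h7]; simp)]; 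
                    rw [show surveyStepB (PySem.Dict.mk [("ACT", a), ("Planck", p), ("SPT-3G", s), ("COBE", c), ("WMAP", w), ("LIGO", l), ("Virgo", v), ("KAGRA", g)]) k = PySem.Dict.mk [("ACT", a), ("Planck", p), ("SPT-3G", s), ("COBE", c), ("WMAP", w), ("LIGO", l), ("Virgo", v), ("KAGRA", g)] from by
                      simp [surveyStepB, hcl]]
                    rw [ih]
                    simp only [List.filter_cons]
                    rw [h0, h1, h2, h3, h4, h5, h6, h7]
                    simp

-- ===== VERDICT =====
theorem get_survey_mapping_spec : Claim_equal_get_survey_mapping := by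
  intro cd _
  unfold Spec_get_survey_mapping
  simp only [get_survey_mapping, get_survey_mapping_alt]
  rw [show (PySem.Dict.ofList
      [("ACT", ([] : List String)), ("Planck", []), ("SPT-3G", []), ("COBE", []), ("WMAP", []),
       ("LIGO", []), ("Virgo", []), ("KAGRA", [])] : PySem.Dict String (List String)) = PySem.Dict.mk
      [("ACT", []), ("Planck", []), ("SPT-3G", []), ("COBE", []), ("WMAP", []),
       ("LIGO", []), ("Virgo", []), ("KAGRA", [])] from by decide]
  rw [foldl_surveyStepB]
  simp [PySem.Dict.getD, PySem.Dict.get?_mk_cons]
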